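-- pv_equiv track=rewrite | github.com/alvanxp/algorithms | Codility/slice_walter.py | solution
-- ===== SOURCE A (Python) =====
-- def solution(A):
--     max_sum = 0
--     starting_here = [0] * len(A)
--     starting_here[len(A)-1] = A[len(A)-1]
--     for idx in reversed(range(len(A)-1)):
--         starting_here[idx] = max(starting_here[idx+1], A[idx])
--
--     for idx in range(len(A)-2):
--         max_sum = max(starting_here[idx+2] + A[idx], max_sum)
--
--     return max_sum
-- ===== SOURCE B (Python) =====
-- def solution(A):
--     n = len(A)
--     res = 0
--     if n >= 3:
--         best = A[n - 1]
--         for i in range(n - 3, -1, -1):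
--             best = max(best, A[i + 2])
--             res = max(res, A[i] + best)
--     return res
-- ===== Notes on version B (the rewrite author's own statement) =====
-- stated objective: simpler
-- what changed: Replaced A's O(n) auxiliary suffix-max array (built in one pass, consumed by a second pass) with a single right-to-left scan that maintains the suffix max as a scalar, in O(1) extra space.
-- crash fix: On the empty list A raises IndexError (it indexes A[len(A)-1]); B naturally returns 0. — e.g. on solution([]): A raises IndexError, B returns 0
import Mathlib
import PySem

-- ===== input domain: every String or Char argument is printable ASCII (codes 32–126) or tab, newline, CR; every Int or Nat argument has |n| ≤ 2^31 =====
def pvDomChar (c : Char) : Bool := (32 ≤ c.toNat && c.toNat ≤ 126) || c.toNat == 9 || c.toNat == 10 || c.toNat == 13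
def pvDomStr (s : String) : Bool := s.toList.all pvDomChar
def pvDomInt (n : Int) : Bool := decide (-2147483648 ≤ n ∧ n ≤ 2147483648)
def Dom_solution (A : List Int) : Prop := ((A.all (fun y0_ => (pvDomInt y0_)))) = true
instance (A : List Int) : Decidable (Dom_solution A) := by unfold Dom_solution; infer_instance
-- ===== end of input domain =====

-- B replaces A's auxiliary suffix-max array and second pass by ONE right-to-left scan
-- keeping the suffix max in a scalar (simpler, O(1) extra space); return values agree on
-- every nonempty list (A raises IndexError on []).

-- ===== PORT A =====
def solutionStep (A : List Int) (sh : List Int) (idx : Int) : List Int :=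
  PySem.List.pySetD sh idx (max (PySem.List.pyGetD sh (idx + 1) 0) (PySem.List.pyGetD A idx 0))

def solution (A : List Int) : Int :=
  let n : Int := A.length
  let sh1 := PySem.List.pySetD (List.replicate A.length (0 : Int)) (n - 1) (PySem.List.pyGetD A (n - 1) 0)
  let sh := ((PySem.List.pyRange 0 (n - 1) 1).reverse).foldl (solutionStep A) sh1
  (PySem.List.pyRange 0 (n - 2) 1).foldl
    (fun ms idx => max (PySem.List.pyGetD sh (idx + 2) 0 + PySem.List.pyGetD A idx 0) ms) 0

-- ===== PORT B =====
def altStep (A : List Int) (st : Int × Int) (i : Int) : Int × Int :=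
  let best := max st.1 (PySem.List.pyGetD A (i + 2) 0)
  (best, max st.2 (PySem.List.pyGetD A i 0 + best))

def solution_alt (A : List Int) : Int :=
  let n : Int := A.length
  if 3 ≤ n then
    ((PySem.List.pyRange (n - 3) (-1) (-1)).foldl (altStep A) (PySem.List.pyGetD A (n - 1) 0, 0)).2
  else 0

-- ===== PRECONDITION & SPEC =====
-- Pre_ excludes exactly the empty list, on which A raises IndexError (A[len(A)-1]).
def Pre_solution (A : List Int) : Prop := A ≠ []
instance (A : List Int) : Decidable (Pre_solution A) := by unfold Pre_solution; infer_instance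

def pvWitness_solution : List Int := [3, -1, 5]

-- On the empty list A raises IndexError (it indexes A[len(A)-1]); B naturally returns 0.
def Raises_solution (A : List Int) : Prop := A = []
instance (A : List Int) : Decidable (Raises_solution A) := by unfold Raises_solution; infer_instance
def pvRaiseWitness_solution : List Int := []
def pvRaiseWitnessOut_solution : Int := 0

def Spec_solution (A : List Int) (out : Int) : Prop := out = solution_alt A
instance (A : List Int) (out : Int) : Decidable (Spec_solution A out) := by unfold Spec_solution; infer_instance

-- ===== CLAIM (what is proved, stated in full; the proofs are below) =====
def Claim_equal_solution : Prop := ∀ (A : List Int), Dom_solution A → Pre_solution A → Spec_solution A (solution A)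
def Claim_raises_solution : Prop := (∀ (A : List Int), Dom_solution A → Raises_solution A → ¬ Pre_solution A) ∧ (Dom_solution (pvRaiseWitness_solution) ∧ Raises_solution (pvRaiseWitness_solution) ∧ solution_alt (pvRaiseWitness_solution) = pvRaiseWitnessOut_solution)

-- ===== LEMMAS AND PROOFS =====

-- max of a nonempty list (0 on []): the value A's suffix array holds at each index.
def smax : List Int → Int
  | [] => 0
  | [x] => x
  | x :: y :: t => max x (smax (y :: t))

-- A's second-loop accumulator after k iterations.
def Gacc (A : List Int) : Nat → Int
  | 0 => 0
  | k + 1 => max (smax (A.drop (k + 2)) + A.getD k 0) (Gacc A k)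

-- B's result accumulator, indices processed k, k-1, …, 0.
def Racc (A : List Int) : Nat → Int → Int
  | 0, r => max r (A.getD 0 0 + smax (A.drop 2))
  | k + 1, r => Racc A k (max r (A.getD (k + 1) 0 + smax (A.drop (k + 3))))

theorem smax_drop (A : List Int) (j : Nat) (h : j + 1 < A.length) :
    smax (A.drop j) = max (A.getD j 0) (smax (A.drop (j + 1))) := by
  have hj : j < A.length := by omega
  have h1 : A.drop j = A[j] :: A.drop (j + 1) := List.drop_eq_getElem_cons hj
  obtain ⟨b, t, h2⟩ : ∃ b t, A.drop (j + 1) = b :: t := by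
    cases hd : A.drop (j + 1) with
    | nil =>
      have := List.length_drop (i := j + 1) (l := A)
      rw [hd] at this; simp at this; omega
    | cons b t => exact ⟨b, t, rfl⟩
  rw [h1, h2, List.getD_eq_getElem A 0 hj]
  simp [smax]

theorem sweep_invariant (A : List Int) : ∀ (m : Nat) (sh : List Int), m < A.length →
    sh.length = A.length →
    (∀ j : Nat, m ≤ j → j < A.length → sh.getD j 0 = smax (A.drop j)) →
    ∀ j : Nat, j < A.length →
      (((PySem.List.pyRange 0 (m : Int) 1).reverse.foldl (solutionStep A) sh).getD j 0 = smax (A.drop j)) := by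
  intro m
  induction m with
  | zero =>
    intro sh _ _ hinv j hj
    rw [show ((0 : Nat) : Int) = 0 by simp, PySem.List.pyRange_one_eq_nil le_rfl]
    exact hinv j (Nat.zero_le j) hj
  | succ m ih =>
    intro sh hm hlen hinv j hj
    rw [show ((m + 1 : Nat) : Int) = (m : Int) + 1 by push_cast; ring,
        PySem.List.pyRange_one_succ_right (by positivity), List.reverse_append]
    simp only [List.reverse_cons, List.reverse_nil, List.nil_append, List.singleton_append,
      List.foldl_cons]
    refine ih (solutionStep A sh (m : Int)) (by omega) ?_ ?_ j hj
    · simp [solutionStep, hlen]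
    · intro j' hj1 hj2
      simp only [solutionStep]
      rw [show ((m : Int) + 1) = ((m + 1 : Nat) : Int) by push_cast; ring]
      simp only [PySem.List.pySetD_natCast, PySem.List.pyGetD_natCast]
      rcases eq_or_lt_of_le hj1 with heq | hlt
      · subst heq
        have hmlen : m < sh.length := by omega
        rw [List.getD_eq_getElem _ 0 (by simpa using hmlen), List.getElem_set_self (by simpa using hmlen)]
        rw [hinv (m + 1) (by omega) (by omega), smax_drop A m (by omega)]
        exact (max_comm _ _)
      · rw [List.getD_eq_getElem?_getD, List.getElem?_set_ne (by omega),
            ← List.getD_eq_getElem?_getD]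
        exact hinv j' (by omega) hj2

theorem second_loop (A sh : List Int)
    (hsh : ∀ j : Nat, j < A.length → sh.getD j 0 = smax (A.drop j)) :
    ∀ (m : Nat), m + 2 ≤ A.length →
      (PySem.List.pyRange 0 (m : Int) 1).foldl
        (fun ms idx => max (PySem.List.pyGetD sh (idx + 2) 0 + PySem.List.pyGetD A idx 0) ms) 0 = Gacc A m := by
  intro m
  induction m with
  | zero =>
    intro _
    rw [show ((0 : Nat) : Int) = 0 by simp, PySem.List.pyRange_one_eq_nil le_rfl]
    rfl
  | succ m ih =>
    intro hm
    rw [show ((m + 1 : Nat) : Int) = (m : Int) + 1 by push_cast; ring,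
        PySem.List.pyRange_one_succ_right (by positivity), List.foldl_append]
    simp only [List.foldl_cons, List.foldl_nil]
    rw [ih (by omega),
        show ((m : Int) + 2) = ((m + 2 : Nat) : Int) by push_cast; ring]
    simp only [PySem.List.pyGetD_natCast]
    rw [hsh (m + 2) (by omega)]
    rfl

theorem alt_loop (A : List Int) : ∀ (k : Nat) (b r : Int), k + 3 ≤ A.length →
    max b (A.getD (k + 2) 0) = smax (A.drop (k + 2)) →
    ((PySem.List.pyRange (k : Int) (-1) (-1)).foldl (altStep A) (b, r)).2 = Racc A k r := by
  intro k
  induction k with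
  | zero =>
    intro b r _ hb
    rw [show ((0 : Nat) : Int) = 0 by simp,
        PySem.List.pyRange_neg_one_cons (by norm_num),
        show (0 : Int) - 1 = -1 by ring, PySem.List.pyRange_neg_one_eq_nil le_rfl]
    simp only [List.foldl_cons, List.foldl_nil, altStep]
    norm_num
    rw [show (2 : Int) = ((2 : Nat) : Int) by norm_num] at *
    simp only [PySem.List.pyGetD_natCast, PySem.List.pyGetD_zero] at *
    rw [hb]
    simp [Racc, List.getD]
  | succ k ih =>
    intro b r hk hb
    rw [PySem.List.pyRange_neg_one_cons (by omega),
        show ((k + 1 : Nat) : Int) - 1 = (k : Int) by push_cast; ring]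
    simp only [List.foldl_cons, altStep]
    rw [show ((k + 1 : Nat) : Int) + 2 = ((k + 3 : Nat) : Int) by push_cast; ring]
    simp only [PySem.List.pyGetD_natCast]
    rw [show ((k + 1 + 2) : Nat) = k + 3 by omega] at hb
    rw [hb, ih (smax (A.drop (k + 3))) _ (by omega)
          (by rw [smax_drop A (k + 2) (by omega)]
              rw [show (k + 2 + 1 : Nat) = k + 3 by omega]
              exact max_comm _ _)]
    rfl

theorem Racc_eq_Gacc (A : List Int) : ∀ (k : Nat) (r : Int), Racc A k (max r 0) = max r (Gacc A (k + 1)) := by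
  intro k
  induction k with
  | zero => intro r; simp only [Racc, Gacc, Nat.zero_add]; omega
  | succ k ih =>
    intro r
    simp only [Racc]
    rw [show max (max r 0) (A.getD (k + 1) 0 + smax (A.drop (k + 3)))
          = max (max r (A.getD (k + 1) 0 + smax (A.drop (k + 3)))) 0 by omega,
        ih]
    have h2 : Gacc A (k + 1 + 1) = max (smax (A.drop (k + 3)) + A.getD (k + 1) 0) (Gacc A (k + 1)) := by
      simp only [Gacc]
    rw [h2]
    omega

theorem Gacc_nonneg (A : List Int) (k : Nat) : 0 ≤ Gacc A k := by
  induction k with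
  | zero => simp [Gacc]
  | succ k ih => simp only [Gacc]; omega

-- ===== VERDICT (by name: the statement is the Claim_ definition above) =====
theorem solution_spec : Claim_equal_solution := by
  intro A _ hpre
  unfold Spec_solution
  have hlen : 1 ≤ A.length := by
    cases A with
    | nil => exact absurd rfl hpre
    | cons a t => simp
  simp only [solution, solution_alt]
  by_cases h3 : 3 ≤ A.length
  · -- length ≥ 3 : both sides equal Gacc A (A.length - 2)
    rw [show ((A.length : Int) - 1) = ((A.length - 1 : Nat) : Int) by omega,
        show ((A.length : Int) - 2) = ((A.length - 2 : Nat) : Int) by omega,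
        show ((A.length : Int) - 3) = ((A.length - 3 : Nat) : Int) by omega,
        if_pos (by omega : (3 : Int) ≤ (A.length : Int))]
    simp only [PySem.List.pySetD_natCast, PySem.List.pyGetD_natCast]
    have hsmaxl : smax (A.drop (A.length - 1)) = A.getD (A.length - 1) 0 := by
      rw [List.drop_eq_getElem_cons (by omega : A.length - 1 < A.length),
          show A.length - 1 + 1 = A.length by omega, List.drop_length,
          List.getD_eq_getElem A 0 (by omega)]
      rfl
    have hbase : ∀ j : Nat, A.length - 1 ≤ j → j < A.length →
        ((List.replicate A.length (0 : Int)).set (A.length - 1) (A.getD (A.length - 1) 0)).getD j 0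
          = smax (A.drop j) := by
      intro j h1 h2
      have hj : j = A.length - 1 := by omega
      subst hj
      rw [List.getD_eq_getElem _ 0 (by simp; omega),
          List.getElem_set_self (by simp; omega), hsmaxl]
    have hchar := sweep_invariant A (A.length - 1) _ (by omega) (by simp) hbase
    rw [second_loop A _ hchar (A.length - 2) (by omega),
        alt_loop A (A.length - 3) _ 0 (by omega)
          (by rw [show A.length - 3 + 2 = A.length - 1 by omega, max_self]
              exact hsmaxl.symm)]
    have h := Racc_eq_Gacc A (A.length - 3) 0
    rw [max_self, show A.length - 3 + 1 = A.length - 2 by omega] at h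
    have hg := Gacc_nonneg A (A.length - 2)
    omega
  · -- length < 3 : both sides are 0
    rw [if_neg (by omega : ¬ (3 : Int) ≤ (A.length : Int)),
        PySem.List.pyRange_one_eq_nil (by omega : ((A.length : Int) - 2) ≤ 0)]
    rfl

-- solution_raises: the crash-fix claim — the empty list lies outside Pre_, and there B returns 0.
@[simp] theorem solution_raises : Claim_raises_solution := by
  unfold Claim_raises_solution
  exact ⟨fun A _ h => by simp [Raises_solution, Pre_solution] at h ⊢; exact h, by decide⟩
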